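-- pv_equiv track=rewrite | github.com/Daharen/Opening_Trainer | src/opening_trainer/developer_timing.py | parse_overlay_key_dimensions
-- ===== SOURCE A (Python) =====
-- def parse_overlay_key_dimensions(context_keys: list[str]) -> dict[str, list[str]]:
--     dimensions = {
--         "time_control_id": set(),
--         "mover_elo_band": set(),
--         "clock_pressure_bucket": set(),
--         "prev_opp_think_bucket": set(),
--         "opening_ply_band": set(),
--     }
--     for key in context_keys:
--         tokens = [part.strip() for part in str(key).split("|")]
--         if len(tokens) < 5:
--             continue
--         dimensions["time_control_id"].add(tokens[0])
--         dimensions["mover_elo_band"].add(tokens[1])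
--         dimensions["clock_pressure_bucket"].add(tokens[2])
--         dimensions["prev_opp_think_bucket"].add(tokens[3])
--         dimensions["opening_ply_band"].add(tokens[4])
--     return {name: sorted(values) for name, values in dimensions.items()}
-- ===== SOURCE B (Python) =====
-- def parse_overlay_key_dimensions(context_keys: list[str]) -> dict[str, list[str]]:
--     names = [
--         "time_control_id",
--         "mover_elo_band",
--         "clock_pressure_bucket",
--         "prev_opp_think_bucket",
--         "opening_ply_band",
--     ]
--     rows = []
--     for key in context_keys:
--         tokens = [part.strip() for part in str(key).split("|")]
--         if len(tokens) >= 5: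
--             rows.append(tokens[:5])
--     cols = list(zip(*rows)) if rows else [()] * 5
--     return {name: sorted(set(col)) for name, col in zip(names, cols)}
-- ===== Notes on version B (the rewrite author's own statement) =====
-- stated objective: alternative
-- what changed: B materializes a table of truncated token rows, transposes it with zip(*rows), and dedupes-and-sorts each column once, instead of A's five incremental set accumulators updated inside the key loop.
import Mathlib
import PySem

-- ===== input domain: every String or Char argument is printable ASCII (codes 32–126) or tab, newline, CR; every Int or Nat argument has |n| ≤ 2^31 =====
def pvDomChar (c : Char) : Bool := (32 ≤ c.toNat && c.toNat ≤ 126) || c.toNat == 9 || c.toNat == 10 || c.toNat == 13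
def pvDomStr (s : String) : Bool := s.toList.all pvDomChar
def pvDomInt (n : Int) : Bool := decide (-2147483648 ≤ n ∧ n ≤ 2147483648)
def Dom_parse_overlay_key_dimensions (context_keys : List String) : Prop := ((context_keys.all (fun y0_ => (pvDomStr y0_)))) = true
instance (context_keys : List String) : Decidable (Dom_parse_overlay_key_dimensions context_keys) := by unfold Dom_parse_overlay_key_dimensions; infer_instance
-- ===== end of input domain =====

-- B replaces A's five incremental set accumulators with a materialized table of
-- truncated token rows that is transposed column-wise and each column deduped and
-- sorted once (objective: alternative decomposition, same cost).


-- ===== PORT A =====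
-- tokens[i] with i < len(tokens) guaranteed by the length check
def pyAt (l : List String) (i : Nat) : String := l.getD i ""

def pvStepA (s : PySem.Set String × PySem.Set String × PySem.Set String × PySem.Set String × PySem.Set String)
    (key : String) :
    PySem.Set String × PySem.Set String × PySem.Set String × PySem.Set String × PySem.Set String :=
  let tokens := ((PySem.Str.split? key "|").getD []).map PySem.Str.strip
  if tokens.length < 5 then s
  else (s.1.add (pyAt tokens 0), s.2.1.add (pyAt tokens 1),
        s.2.2.1.add (pyAt tokens 2), s.2.2.2.1.add (pyAt tokens 3),
        s.2.2.2.2.add (pyAt tokens 4))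

def parse_overlay_key_dimensions (context_keys : List String) : List (String × List String) :=
  let dims := context_keys.foldl pvStepA
    (PySem.Set.empty, PySem.Set.empty, PySem.Set.empty, PySem.Set.empty, PySem.Set.empty)
  [("time_control_id", PySem.List.sorted dims.1 (fun x => x) false),
   ("mover_elo_band", PySem.List.sorted dims.2.1 (fun x => x) false),
   ("clock_pressure_bucket", PySem.List.sorted dims.2.2.1 (fun x => x) false),
   ("prev_opp_think_bucket", PySem.List.sorted dims.2.2.2.1 (fun x => x) false),
   ("opening_ply_band", PySem.List.sorted dims.2.2.2.2 (fun x => x) false)]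

-- ===== PORT B =====
def pvRows (context_keys : List String) : List (List String) :=
  context_keys.filterMap (fun key =>
    let tokens := ((PySem.Str.split? key "|").getD []).map PySem.Str.strip
    if tokens.length >= 5 then some (tokens.take 5) else none)

-- column i of the transposed table (zip(*rows)); every row has length 5
def pvCol (rows : List (List String)) (i : Nat) : List String :=
  rows.map (fun r => pyAt r i)

def parse_overlay_key_dimensions_alt (context_keys : List String) : List (String × List String) :=
  let rows := pvRows context_keys
  let names := ["time_control_id", "mover_elo_band", "clock_pressure_bucket",
                "prev_opp_think_bucket", "opening_ply_band"]
  names.zipIdx.map (fun p =>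
    (p.1, PySem.List.sorted (PySem.Set.ofList (pvCol rows p.2)) (fun x => x) false))

-- ===== PRECONDITION & SPEC =====
def Spec_parse_overlay_key_dimensions (context_keys : List String) (out : List (String × List String)) : Prop := out = parse_overlay_key_dimensions_alt context_keys
instance (context_keys : List String) (out : List (String × List String)) : Decidable (Spec_parse_overlay_key_dimensions context_keys out) := by unfold Spec_parse_overlay_key_dimensions; infer_instance

-- ===== CLAIM (what is proved, stated in full; the proofs are below) =====
def Claim_equal_parse_overlay_key_dimensions : Prop := ∀ (context_keys : List String), Dom_parse_overlay_key_dimensions context_keys → Spec_parse_overlay_key_dimensions context_keys (parse_overlay_key_dimensions context_keys)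

-- ===== LEMMAS AND PROOFS =====
theorem pyAt_take5 (l : List String) (i : Nat) (h : i < 5) :
    pyAt (l.take 5) i = pyAt l i := by
  simp [pyAt, List.getD, h]

theorem foldA_eq (keys : List String) (s0 s1 s2 s3 s4 : PySem.Set String) :
    keys.foldl pvStepA (s0, s1, s2, s3, s4) =
      (PySem.Set.update s0 (pvCol (pvRows keys) 0),
       PySem.Set.update s1 (pvCol (pvRows keys) 1),
       PySem.Set.update s2 (pvCol (pvRows keys) 2),
       PySem.Set.update s3 (pvCol (pvRows keys) 3),
       PySem.Set.update s4 (pvCol (pvRows keys) 4)) := by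
  induction keys generalizing s0 s1 s2 s3 s4 with
  | nil => simp [pvRows, pvCol, PySem.Set.update]
  | cons k t ih =>
    by_cases h : (((PySem.Str.split? k "|").getD []).map PySem.Str.strip).length < 5
    · have h' := h; simp only [List.length_map] at h'
      simp [pvStepA, pvRows, h', Nat.not_le.mpr h', ih]
    · have h5 : 5 ≤ (((PySem.Str.split? k "|").getD []).map PySem.Str.strip).length := Nat.not_lt.mp h
      have h5' := h5; simp only [List.length_map] at h5'
      simp [pvStepA, pvRows, h5', Nat.not_lt.mpr h5', ih, pvCol, PySem.Set.update,
        pyAt_take5 _ 0 (by norm_num), pyAt_take5 _ 1 (by norm_num), pyAt_take5 _ 2 (by norm_num),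
        pyAt_take5 _ 3 (by norm_num), pyAt_take5 _ 4 (by norm_num)]

-- ===== VERDICT (by name: the statement is the Claim_ definition above) =====
theorem parse_overlay_key_dimensions_spec : Claim_equal_parse_overlay_key_dimensions := by
  intro ks _
  show _ = _
  simp [parse_overlay_key_dimensions, parse_overlay_key_dimensions_alt,
    foldA_eq, PySem.Set.ofList_eq_foldl, PySem.Set.update, PySem.Set.empty,
    List.zipIdx]
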